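-- pv_equiv track=rewrite | github.com/iwatkot/maps4fs | maps4fs/generator/osm.py | _common_output_tags
-- ===== SOURCE A (Python) =====
-- def _common_output_tags(
--     tag_sets: list[dict[str, str]],
--     merge_key: tuple[tuple[str, str], ...],
--     remove_keys: set[str] | None = None,
-- ) -> dict[str, str]:
--     """Return stable output tags for a processed polygon group.
--
--     Arguments:
--         tag_sets (list[dict[str, str]]): Source tag dictionaries from all
--             polygons in the merge group.
--         merge_key (tuple[tuple[str, str], ...]): Normalized tags that must
--             be preserved on the merged output.
--         remove_keys (set[str] | None): Tag keys to strip from the common source tags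
--             before merge-key tags are applied.
--
--     Returns:
--         dict[str, str]: Tag mapping common across the group with merge-key
--             values forced to remain.
--     """
--     if not tag_sets:
--         return dict(merge_key)
--
--     common_tags = dict(tag_sets[0])
--     for tag_set in tag_sets[1:]:
--         common_tags = {
--             key: value for key, value in common_tags.items() if tag_set.get(key) == value
--         }
--
--     if remove_keys:
--         common_tags = {key: value for key, value in common_tags.items() if key not in remove_keys}
--
--     for key, value in merge_key:
--         common_tags[key] = value
--     return common_tags
-- ===== SOURCE B (Python) =====
-- def _common_output_tags(
--     tag_sets: list[dict[str, str]],
--     merge_key: tuple[tuple[str, str], ...],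
--     remove_keys: set[str] | None = None,
-- ) -> dict[str, str]:
--     """Count-then-filter: one sweep tallies every exact (key, value) pair,
--     then pairs present in all tag sets are selected in a single comprehension."""
--     if not tag_sets:
--         return dict(merge_key)
--
--     n = len(tag_sets)
--     tally: dict[tuple[str, str], int] = {}
--     for tag_set in tag_sets:
--         for kv in tag_set.items():
--             tally[kv] = tally.get(kv, 0) + 1
--
--     rk = remove_keys or set()
--     result = {
--         key: value
--         for key, value in tag_sets[0].items()
--         if tally[(key, value)] == n and key not in rk
--     }
--     result.update(merge_key)
--     return result
-- ===== Notes on version B (the rewrite author's own statement) =====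
-- stated objective: alternative
-- what changed: Replaces the iterative re-narrowing of common_tags (a fresh dict comprehension per tag set) and the separate remove_keys pass with a single tally built in one sweep counting each exact (key, value) pair, followed by one combined comprehension selecting pairs whose count equals len(tag_sets) and whose key is not removed; merge_key is applied via dict.update.
import Mathlib
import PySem

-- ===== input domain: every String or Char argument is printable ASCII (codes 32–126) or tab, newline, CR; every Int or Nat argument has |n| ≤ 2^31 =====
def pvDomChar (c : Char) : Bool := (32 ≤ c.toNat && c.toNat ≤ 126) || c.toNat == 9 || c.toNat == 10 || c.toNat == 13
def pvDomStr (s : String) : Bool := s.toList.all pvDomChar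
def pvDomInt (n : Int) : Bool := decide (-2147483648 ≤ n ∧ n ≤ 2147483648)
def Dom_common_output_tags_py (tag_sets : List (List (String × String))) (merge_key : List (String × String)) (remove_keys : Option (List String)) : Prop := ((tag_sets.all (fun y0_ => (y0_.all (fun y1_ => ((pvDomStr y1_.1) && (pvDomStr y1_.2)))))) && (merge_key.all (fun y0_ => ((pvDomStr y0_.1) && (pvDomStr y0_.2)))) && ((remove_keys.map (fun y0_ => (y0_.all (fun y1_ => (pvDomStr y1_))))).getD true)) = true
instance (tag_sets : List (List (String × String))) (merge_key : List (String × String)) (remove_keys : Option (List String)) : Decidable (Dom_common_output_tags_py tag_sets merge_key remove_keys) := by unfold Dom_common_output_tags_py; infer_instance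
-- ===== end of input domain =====

-- B replaces A's iterative re-narrowing (one fresh dict comprehension per tag set, plus a
-- separate remove_keys pass) by a one-sweep tally of exact (key, value) pairs followed by a
-- single combined selection; same cost class, genuinely different decomposition.

-- ===== PORT A =====
-- A's dict comprehensions build a dict from pairs whose keys are already unique (they are
-- filtered from a dict's items), so `PySem.Dict.mk <filtered items>` is exact there.
def common_output_tags_py (tag_sets : List (List (String × String))) (merge_key : List (String × String)) (remove_keys : Option (List String)) : List (String × String) :=
  match tag_sets with
  | [] => (PySem.Dict.ofList merge_key).items
  | first :: rest =>
    let common0 : PySem.Dict String String := PySem.Dict.ofList first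
    let common1 := rest.foldl (fun c s =>
      PySem.Dict.mk (c.items.filter (fun kv => (PySem.Dict.ofList s).get? kv.1 == some kv.2))) common0
    let common2 :=
      match remove_keys with
      | none => common1
      | some l =>
        if l.isEmpty then common1
        else PySem.Dict.mk (common1.items.filter (fun kv => !(l.contains kv.1)))
    (merge_key.foldl (fun c kv => c.insert kv.1 kv.2) common2).items

-- ===== PORT B =====
-- `tally[(key, value)]` is ported as `tally.getD kv 0`: exact here, since every pair of the
-- first tag set was counted during the sweep, so the key is always present.
def common_output_tags_py_alt (tag_sets : List (List (String × String))) (merge_key : List (String × String)) (remove_keys : Option (List String)) : List (String × String) :=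
  match tag_sets with
  | [] => (PySem.Dict.ofList merge_key).items
  | first :: _ =>
    let n : Int := (tag_sets.length : Int)
    let tally : PySem.Dict (String × String) Int :=
      tag_sets.foldl (fun t s =>
        ((PySem.Dict.ofList s).items).foldl (fun t kv => t.modify kv 0 (· + 1)) t) PySem.Dict.empty
    let rk : List String := remove_keys.getD []
    let result := PySem.Dict.mk (((PySem.Dict.ofList first).items).filter
      (fun kv => tally.getD kv 0 == n && !(rk.contains kv.1)))
    (result.update merge_key).items

-- ===== PRECONDITION & SPEC =====
def Spec_common_output_tags_py (tag_sets : List (List (String × String))) (merge_key : List (String × String)) (remove_keys : Option (List String)) (out : List (String × String)) : Prop := out = common_output_tags_py_alt tag_sets merge_key remove_keys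
instance (tag_sets : List (List (String × String))) (merge_key : List (String × String)) (remove_keys : Option (List String)) (out : List (String × String)) : Decidable (Spec_common_output_tags_py tag_sets merge_key remove_keys out) := by unfold Spec_common_output_tags_py; infer_instance

-- ===== CLAIM (what is proved, stated in full; the proofs are below) =====
def Claim_equal_common_output_tags_py : Prop := ∀ (tag_sets : List (List (String × String))) (merge_key : List (String × String)) (remove_keys : Option (List String)), Dom_common_output_tags_py tag_sets merge_key remove_keys → Spec_common_output_tags_py tag_sets merge_key remove_keys (common_output_tags_py tag_sets merge_key remove_keys)

-- ===== LEMMAS AND PROOFS =====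

-- Proof-only abbreviations for the intermediate dicts of the two ports (definitionally
-- equal to the corresponding subterms of the ports).
def pvCommon1 (first : List (String × String)) (rest : List (List (String × String))) : PySem.Dict String String :=
  rest.foldl (fun c s =>
    PySem.Dict.mk (c.items.filter (fun kv => (PySem.Dict.ofList s).get? kv.1 == some kv.2)))
    (PySem.Dict.ofList first)

def pvCommon2 (first : List (String × String)) (rest : List (List (String × String)))
    (remove_keys : Option (List String)) : PySem.Dict String String :=
  match remove_keys with
  | none => pvCommon1 first rest
  | some l =>
    if l.isEmpty then pvCommon1 first rest
    else PySem.Dict.mk ((pvCommon1 first rest).items.filter (fun kv => !(l.contains kv.1)))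

def pvTally (ts : List (List (String × String))) : PySem.Dict (String × String) Int :=
  ts.foldl (fun t s =>
    ((PySem.Dict.ofList s).items).foldl (fun t kv => t.modify kv 0 (· + 1)) t) PySem.Dict.empty

def pvResult (first : List (String × String)) (ts : List (List (String × String)))
    (remove_keys : Option (List String)) : PySem.Dict String String :=
  PySem.Dict.mk (((PySem.Dict.ofList first).items).filter
    (fun kv => (pvTally ts).getD kv 0 == (ts.length : Int) && !((remove_keys.getD []).contains kv.1)))

-- A's fold of per-set comprehensions is one filter by "every later set has the pair".
theorem foldA_items (rest : List (List (String × String))) (c : PySem.Dict String String) :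
    (rest.foldl (fun c s =>
      PySem.Dict.mk (c.items.filter (fun kv => (PySem.Dict.ofList s).get? kv.1 == some kv.2))) c).items
    = c.items.filter (fun kv => rest.all (fun s => (PySem.Dict.ofList s).get? kv.1 == some kv.2)) := by
  induction rest generalizing c with
  | nil => simp
  | cons s rest ih =>
    simp only [List.foldl_cons, ih, List.all_cons]
    show (c.items.filter _).filter _ = _
    rw [List.filter_filter]
    exact List.filter_congr (fun kv _ => by rw [Bool.and_comm])

-- B's tally counts, for each pair, its occurrences across all item lists.
theorem tally_getD (ts : List (List (String × String))) (t : PySem.Dict (String × String) Int)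
    (kv : String × String) :
    (ts.foldl (fun t s =>
      ((PySem.Dict.ofList s).items).foldl (fun t kv => t.modify kv 0 (· + 1)) t) t).getD kv 0
    = t.getD kv 0 + (ts.map (fun s => ((PySem.Dict.ofList s).items.count kv : Int))).sum := by
  induction ts generalizing t with
  | nil => simp
  | cons s ts ih =>
    simp only [List.foldl_cons, ih, PySem.Dict.getD_foldl_modify_add_one, List.map_cons,
      List.sum_cons]
    ring

-- In a dict, a pair occurs in the items at most once; its count is 1 iff get? finds it.
theorem count_items (s : List (String × String)) (kv : String × String) :
    ((PySem.Dict.ofList s).items.count kv : Int)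
    = if (PySem.Dict.ofList s).get? kv.1 = some kv.2 then 1 else 0 := by
  have hnd : (PySem.Dict.ofList s).items.Nodup :=
    List.Nodup.of_map Prod.fst (PySem.Dict.nodup_keys_ofList s)
  rw [hnd.count]
  by_cases h : (PySem.Dict.ofList s).get? kv.1 = some kv.2
  · have := (PySem.Dict.get?_eq_some_iff_mem_items (PySem.Dict.ofList s) kv.1 kv.2
      (PySem.Dict.nodup_keys_ofList s)).mp h
    simp [h, this]
  · have : kv ∉ (PySem.Dict.ofList s).items := fun hm =>
      h ((PySem.Dict.get?_eq_some_iff_mem_items (PySem.Dict.ofList s) kv.1 kv.2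
        (PySem.Dict.nodup_keys_ofList s)).mpr hm)
    simp [h, this]

theorem sum_le_len (ts : List (List (String × String))) (kv : String × String) :
    (ts.map (fun s => ((PySem.Dict.ofList s).items.count kv : Int))).sum ≤ (ts.length : Int) := by
  induction ts with
  | nil => simp
  | cons s ts ih =>
    simp only [List.map_cons, List.sum_cons, List.length_cons]
    rw [count_items]
    push_cast
    split_ifs <;> linarith

-- The tally reaches the number of sets exactly when every set contains the pair.
theorem sum_eq_len_iff (ts : List (List (String × String))) (kv : String × String) :
    ((ts.map (fun s => ((PySem.Dict.ofList s).items.count kv : Int))).sum = (ts.length : Int))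
    ↔ (ts.all (fun s => (PySem.Dict.ofList s).get? kv.1 == some kv.2) = true) := by
  induction ts with
  | nil => simp
  | cons s ts ih =>
    have hle := sum_le_len ts kv
    simp only [List.map_cons, List.sum_cons, List.length_cons, List.all_cons, Bool.and_eq_true,
      beq_iff_eq, ← ih]
    rw [count_items]
    push_cast
    split_ifs with h
    · constructor
      · intro hh; exact ⟨h, by linarith⟩
      · rintro ⟨-, hs⟩; linarith
    · constructor
      · intro hh; exfalso; linarith
      · rintro ⟨hc, -⟩; exact absurd hc h

-- The two intermediate dicts coincide.
theorem common_dicts_eq (first : List (String × String)) (rest : List (List (String × String)))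
    (remove_keys : Option (List String)) :
    pvCommon2 first rest remove_keys = pvResult first (first :: rest) remove_keys := by
  apply PySem.Dict.ext
  have hcount : ∀ kv ∈ (PySem.Dict.ofList first).items,
      ((pvTally (first :: rest)).getD kv 0 == (((first :: rest).length : Nat) : Int))
      = rest.all (fun s => (PySem.Dict.ofList s).get? kv.1 == some kv.2) := by
    intro kv hm
    have hfirst : (PySem.Dict.ofList first).get? kv.1 = some kv.2 :=
      PySem.Dict.get?_of_mem_items _ hm (PySem.Dict.nodup_keys_ofList first)
    unfold pvTally
    rw [tally_getD]
    simp only [PySem.Dict.getD_empty, zero_add]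
    by_cases hall : rest.all (fun s => (PySem.Dict.ofList s).get? kv.1 == some kv.2) = true
    · rw [hall]
      have hall' : (first :: rest).all (fun s => (PySem.Dict.ofList s).get? kv.1 == some kv.2) = true := by
        simp [List.all_cons, hfirst, hall]
      exact beq_iff_eq.mpr ((sum_eq_len_iff (first :: rest) kv).mpr hall')
    · simp only [Bool.not_eq_true] at hall
      rw [hall]
      apply beq_eq_false_iff_ne.mpr
      intro hc
      have hthis := (sum_eq_len_iff (first :: rest) kv).mp hc
      simp only [List.all_cons, Bool.and_eq_true] at hthis
      rw [hthis.2] at hall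
      simp at hall
  show (pvCommon2 first rest remove_keys).items
      = ((PySem.Dict.ofList first).items).filter
          (fun kv => (pvTally (first :: rest)).getD kv 0 == (((first :: rest).length : Nat) : Int)
            && !((remove_keys.getD []).contains kv.1))
  rcases remove_keys with _ | l
  · show (pvCommon1 first rest).items = _
    unfold pvCommon1
    rw [foldA_items]
    apply Eq.symm
    apply List.filter_congr
    intro kv hm
    simp only [Option.getD_none, List.contains_nil, Bool.not_false, Bool.and_true]
    exact hcount kv hm
  · rcases l with _ | ⟨x, xs⟩
    · show (pvCommon1 first rest).items = _
      unfold pvCommon1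
      rw [foldA_items]
      apply Eq.symm
      apply List.filter_congr
      intro kv hm
      simp only [Option.getD_some, List.contains_nil, Bool.not_false, Bool.and_true]
      exact hcount kv hm
    · show ((pvCommon1 first rest).items.filter _) = _
      unfold pvCommon1
      rw [foldA_items, List.filter_filter]
      apply Eq.symm
      apply List.filter_congr
      intro kv hm
      simp only [Option.getD_some]
      rw [hcount kv hm, Bool.and_comm]

theorem common_output_tags_py_eq (tag_sets : List (List (String × String)))
    (merge_key : List (String × String)) (remove_keys : Option (List String)) :
    common_output_tags_py tag_sets merge_key remove_keys
    = common_output_tags_py_alt tag_sets merge_key remove_keys := by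
  rcases tag_sets with _ | ⟨first, rest⟩
  · rfl
  · show (merge_key.foldl (fun c kv => c.insert kv.1 kv.2) (pvCommon2 first rest remove_keys)).items
      = ((pvResult first (first :: rest) remove_keys).update merge_key).items
    rw [common_dicts_eq]
    rfl

-- ===== VERDICT (by name: the statement is the Claim_ definition above) =====
theorem common_output_tags_py_spec : Claim_equal_common_output_tags_py := by
  intro tag_sets merge_key remove_keys _
  exact common_output_tags_py_eq tag_sets merge_key remove_keys
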